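-- pv_equiv track=rewrite | github.com/jdistelrath/rbl-baseball | daily_picks.py | _lookup_line
-- ===== SOURCE A (Python) =====
-- def _normalize_name(name):
--     """Lowercase, strip suffixes like Jr./III, collapse whitespace."""
--     n = name.lower().strip()
--     for suffix in (" jr.", " jr", " sr.", " sr", " ii", " iii", " iv"):
--         if n.endswith(suffix):
--             n = n[: -len(suffix)].strip()
--     return " ".join(n.split())
--
-- def _lookup_line(lines, player_name, market):
--     """Find best book line for a player+market.  Prefer DK, then FD, then UD."""
--     norm = _normalize_name(player_name)
--     entries = lines.get((norm, market), [])
--     if not entries: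
--         return None
--     for pref in ["draftkings", "fanduel", "underdog"]:
--         for e in entries:
--             if e["book"] == pref:
--                 return e
--     return entries[0]
-- ===== SOURCE B (Python) =====
-- _PREFS = ["draftkings", "fanduel", "underdog"]
--
-- def _normalize_name(name):
--     """Lowercase, strip suffixes like Jr./III, collapse whitespace."""
--     n = name.lower().strip()
--     for suffix in (" jr.", " jr", " sr.", " sr", " ii", " iii", " iv"):
--         if n.endswith(suffix):
--             n = n[: -len(suffix)].strip()
--     return " ".join(n.split())
--
-- def _rank(e):
--     b = e.get("book")
--     return _PREFS.index(b) if b in _PREFS else len(_PREFS)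
--
-- def _lookup_line(lines, player_name, market):
--     """Find best book line for a player+market: first entry of best rank (DK<FD<UD<other)."""
--     norm = _normalize_name(player_name)
--     entries = lines.get((norm, market), [])
--     if not entries:
--         return None
--     return min(entries, key=_rank)
-- ===== Notes on version B (the rewrite author's own statement) =====
-- stated objective: simpler
-- what changed: Replaces A's nested loops (for each preferred book, rescan all entries) plus entries[0] fallback by a single min-by-rank pass, ranking books draftkings<fanduel<underdog<unknown and relying on min's first-minimal stability.
import Mathlib
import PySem

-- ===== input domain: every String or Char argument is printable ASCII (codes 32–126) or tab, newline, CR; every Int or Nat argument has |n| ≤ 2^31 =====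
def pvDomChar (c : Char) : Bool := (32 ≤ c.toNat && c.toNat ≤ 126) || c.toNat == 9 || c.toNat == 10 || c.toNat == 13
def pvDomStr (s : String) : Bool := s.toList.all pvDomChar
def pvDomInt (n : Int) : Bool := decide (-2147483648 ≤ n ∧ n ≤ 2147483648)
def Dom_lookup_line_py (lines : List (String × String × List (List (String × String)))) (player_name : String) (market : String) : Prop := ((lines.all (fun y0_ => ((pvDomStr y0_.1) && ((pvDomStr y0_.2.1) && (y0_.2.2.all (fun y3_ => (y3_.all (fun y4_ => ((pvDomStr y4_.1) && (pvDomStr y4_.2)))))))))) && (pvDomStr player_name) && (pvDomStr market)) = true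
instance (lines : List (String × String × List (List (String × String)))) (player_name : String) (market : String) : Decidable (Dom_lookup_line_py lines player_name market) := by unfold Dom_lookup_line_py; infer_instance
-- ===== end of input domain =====

-- B replaces A's nested preference loops by a single min-by-rank pass (objective: simpler).
-- Shared helpers (identical in Source A and Source B): _normalize_name, the dict lookups.

def pvNormalize (name : String) : String :=
  let n := PySem.Str.strip (PySem.Str.lower name)
  let n := [" jr.", " jr", " sr.", " sr", " ii", " iii", " iv"].foldl
    (fun n suffix =>
      if PySem.Str.endswith n suffix then
        PySem.Str.strip (PySem.Str.slice n none (some (-(PySem.Str.len suffix))))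
      else n) n
  PySem.Str.join " " (PySem.Str.split₀ n)

-- e["book"] / e.get("book"): first-match association-list lookup
def pvGetBook (e : List (String × String)) : Option String :=
  (e.find? (fun kv => kv.1 == "book")).map (·.2)

-- lines.get((norm, market), [])
def pvEntries (lines : List (String × String × List (List (String × String)))) (norm market : String) : List (List (String × String)) :=
  ((lines.find? (fun t => t.1 == norm && t.2.1 == market)).map (·.2.2)).getD []

-- ===== PORT A =====
-- 'for e in entries: if e["book"] == pref: return e'
def pvFindBook (entries : List (List (String × String))) (pref : String) : Option (List (String × String)) :=
  entries.find? (fun e => pvGetBook e == some pref)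

-- 'for pref in [...]: ...'
def pvScanPrefs (prefs : List String) (entries : List (List (String × String))) : Option (List (String × String)) :=
  match prefs with
  | [] => none
  | p :: rest =>
    match pvFindBook entries p with
    | some e => some e
    | none => pvScanPrefs rest entries

def lookup_line_py (lines : List (String × String × List (List (String × String)))) (player_name : String) (market : String) : Option (List (String × String)) :=
  let norm := pvNormalize player_name
  let entries := pvEntries lines norm market
  if entries.isEmpty then none
  else
    match pvScanPrefs ["draftkings", "fanduel", "underdog"] entries with
    | some e => some e
    | none => PySem.List.pyGet? entries 0

-- ===== PORT B =====
def pvPrefs : List String := ["draftkings", "fanduel", "underdog"]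

-- _rank(e): _PREFS.index(b) if b in _PREFS else len(_PREFS), where b = e.get("book")
def pvRank (e : List (String × String)) : Nat :=
  match pvGetBook e with
  | some b => if pvPrefs.contains b then (PySem.List.index? pvPrefs b).getD pvPrefs.length else pvPrefs.length
  | none => pvPrefs.length

def lookup_line_py_alt (lines : List (String × String × List (List (String × String)))) (player_name : String) (market : String) : Option (List (String × String)) :=
  let norm := pvNormalize player_name
  let entries := pvEntries lines norm market
  if entries.isEmpty then none
  else PySem.List.min? entries pvRank

-- ===== PRECONDITION & SPEC =====
-- Pre_ excludes exactly the inputs on which A raises KeyError: the matched entries list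
-- contains an entry without a "book" key that is not preceded by a draftkings entry
-- (A evaluates e["book"] on every entry up to its first draftkings hit).
def Pre_lookup_line_py (lines : List (String × String × List (List (String × String)))) (player_name : String) (market : String) : Prop :=
  ∀ i < (pvEntries lines (pvNormalize player_name) market).length,
    (∀ j < i, pvGetBook ((pvEntries lines (pvNormalize player_name) market).getD j []) ≠ some "draftkings") →
    (pvGetBook ((pvEntries lines (pvNormalize player_name) market).getD i [])).isSome
instance (lines : List (String × String × List (List (String × String)))) (player_name : String) (market : String) : Decidable (Pre_lookup_line_py lines player_name market) := by unfold Pre_lookup_line_py; infer_instance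

def pvWitness_lookup_line_py : (List (String × String × List (List (String × String)))) × String × String :=
  ([("", "", [[("book", "c"), ("line", "1.5")]])], "", "")

def Spec_lookup_line_py (lines : List (String × String × List (List (String × String)))) (player_name : String) (market : String) (out : Option (List (String × String))) : Prop := out = lookup_line_py_alt lines player_name market
instance (lines : List (String × String × List (List (String × String)))) (player_name : String) (market : String) (out : Option (List (String × String))) : Decidable (Spec_lookup_line_py lines player_name market out) := by unfold Spec_lookup_line_py; infer_instance

-- ===== CLAIM (what is proved, stated in full; the proofs are below) =====
def Claim_equal_lookup_line_py : Prop := ∀ (lines : List (String × String × List (List (String × String)))) (player_name : String) (market : String), Dom_lookup_line_py lines player_name market → Pre_lookup_line_py lines player_name market → Spec_lookup_line_py lines player_name market (lookup_line_py lines player_name market)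


-- ===== LEMMAS AND PROOFS =====

-- the running-minimum body of B's min, seeded with the first element
def pvFm (x : List (String × String)) (t : List (List (String × String))) : List (String × String) :=
  t.foldl (fun m y => if pvRank y < pvRank m then y else m) x

-- A's selection on a nonempty list, as one function
def pvSel (es : List (List (String × String))) : Option (List (String × String)) :=
  match pvScanPrefs pvPrefs es with
  | some e => some e
  | none => es.head?

lemma pvRank_cases (e : List (String × String)) :
    (pvGetBook e = some "draftkings" ∧ pvRank e = 0) ∨
    (pvGetBook e = some "fanduel" ∧ pvRank e = 1) ∨
    (pvGetBook e = some "underdog" ∧ pvRank e = 2) ∨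
    (pvRank e = 3 ∧ pvGetBook e ≠ some "draftkings" ∧ pvGetBook e ≠ some "fanduel" ∧ pvGetBook e ≠ some "underdog") := by
  unfold pvRank
  cases hb : pvGetBook e with
  | none => right; right; right; simp; decide
  | some b =>
    by_cases h1 : b = "draftkings"
    · left; subst h1; simp; decide
    · by_cases h2 : b = "fanduel"
      · right; left; subst h2; simp; decide
      · by_cases h3 : b = "underdog"
        · right; right; left; subst h3; simp; decide
        · right; right; right
          simp [pvPrefs, h1, h2, h3]

lemma pv_min?_cons : ∀ (t : List (List (String × String))) (x : List (String × String)),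
    PySem.List.min? (x :: t) pvRank = some (pvFm x t) := by
  intro t
  induction t with
  | nil => intro x; rfl
  | cons y t ih =>
    intro x
    have h1 : PySem.List.min? (x :: y :: t) pvRank
        = PySem.List.min? ((if pvRank y < pvRank x then y else x) :: t) pvRank := by
      by_cases h : pvRank y < pvRank x <;> simp [PySem.List.min?, h]
    have h2 : pvFm x (y :: t) = pvFm (if pvRank y < pvRank x then y else x) t := by
      by_cases h : pvRank y < pvRank x <;> simp [pvFm, h]
    rw [h1, ih, h2]

lemma pvSel_absorb (x y : List (String × String)) (t : List (List (String × String))) :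
    pvSel (x :: y :: t) = pvSel ((if pvRank y < pvRank x then y else x) :: t) := by
  rcases pvRank_cases x with ⟨hx,rx⟩|⟨hx,rx⟩|⟨hx,rx⟩|⟨rx,hx1,hx2,hx3⟩ <;>
  rcases pvRank_cases y with ⟨hy,ry⟩|⟨hy,ry⟩|⟨hy,ry⟩|⟨ry,hy1,hy2,hy3⟩ <;>
  simp_all [pvSel, pvScanPrefs, pvFindBook, pvPrefs] <;>
  cases List.find? (fun e => pvGetBook e == some "draftkings") t <;> simp <;>
  cases List.find? (fun e => pvGetBook e == some "fanduel") t <;> simp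

lemma pvSel_eq_fm (t : List (List (String × String))) : ∀ x, pvSel (x :: t) = some (pvFm x t) := by
  induction t with
  | nil =>
    intro x
    rcases pvRank_cases x with ⟨hx,rx⟩|⟨hx,rx⟩|⟨hx,rx⟩|⟨rx,hx1,hx2,hx3⟩ <;>
    simp_all [pvSel, pvScanPrefs, pvFindBook, pvPrefs, pvFm]
  | cons y t ih =>
    intro x
    rw [pvSel_absorb, ih]
    have h2 : pvFm x (y :: t) = pvFm (if pvRank y < pvRank x then y else x) t := by
      by_cases h : pvRank y < pvRank x <;> simp [pvFm, h]
    rw [h2]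

theorem lookup_line_py_spec : Claim_equal_lookup_line_py := by
  intro lines player_name market _ _
  unfold Spec_lookup_line_py lookup_line_py lookup_line_py_alt
  cases hes : pvEntries lines (pvNormalize player_name) market with
  | nil => simp [hes]
  | cons x t =>
    simp only [hes, List.isEmpty_cons, reduceCtorEq, if_neg, not_false_eq_true]
    rw [pv_min?_cons, ← pvSel_eq_fm]
    show (match pvScanPrefs pvPrefs (x :: t) with
          | some e => some e
          | none => PySem.List.pyGet? (x :: t) 0) = pvSel (x :: t)
    unfold pvSel
    cases pvScanPrefs pvPrefs (x :: t) <;> simp [PySem.List.pyGet?, PySem.List.pyIdx?]
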